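-- pv_equiv track=rewrite | github.com/apple2062/algorithm | study/greedy/큰수의법칙.py | solution
-- ===== SOURCE A (Python) =====
-- def solution(matrix,m,k):
--     answer = 0
--     matrix.sort()
--     one = matrix[-1]
--     two = matrix[-2]
--     while True:
--         for i in range(k):
--             if m==0:
--                 return answer
--             answer += one
--             m -= 1
--         if m == 0:
--             return answer
--         answer += two
--         m -= 1
-- ===== SOURCE B (Python) =====
-- def solution(matrix, m, k):
--     s = sorted(matrix)
--     one, two = s[-1], s[-2]
--     q, r = divmod(m, k + 1)
--     return q * (k * one + two) + r * one
-- ===== Notes on version B (the rewrite author's own statement) =====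
-- stated objective: simpler
-- what changed: B replaces A's step-by-step accumulation loop (m iterations adding one element at a time) by a closed-form divmod over full cycles of k largest values plus one second-largest, keeping only the sort; B does not mutate the input list (A sorts it in place); Pre_ excludes matrices with fewer than 2 elements (A raises IndexError), negative m (A's loop never terminates) and negative k (a repetition count, outside the task's natural domain; B's divmod raises at k=-1 and disagrees for k<-1).
-- outside the precondition, e.g. on solution([3, 1], 2, -2): A returns 2, B returns 10; on solution([3, 1], 2, -1): A returns 2, B raises ZeroDivisionError; on solution([5], 3, 2): A raises IndexError, B raises IndexError
import Mathlib
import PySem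

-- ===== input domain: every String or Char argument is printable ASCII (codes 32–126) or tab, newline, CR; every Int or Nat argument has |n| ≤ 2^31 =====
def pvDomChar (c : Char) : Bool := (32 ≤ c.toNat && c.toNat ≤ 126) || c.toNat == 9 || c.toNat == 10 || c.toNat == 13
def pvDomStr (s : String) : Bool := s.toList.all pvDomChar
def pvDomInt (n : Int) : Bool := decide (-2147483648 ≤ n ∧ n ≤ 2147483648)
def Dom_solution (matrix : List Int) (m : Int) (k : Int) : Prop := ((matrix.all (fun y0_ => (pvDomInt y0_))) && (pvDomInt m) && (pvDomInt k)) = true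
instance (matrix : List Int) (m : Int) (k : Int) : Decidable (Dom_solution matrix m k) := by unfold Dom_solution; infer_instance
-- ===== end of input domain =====

-- B replaces A's element-by-element accumulation loop by a closed-form divmod computation
-- (full cycles of k largest values plus one second-largest, remainder of largest); A also
-- sorts `matrix` in place — the equivalence proved here is about the return value only.

-- ===== PORT A =====
-- inner 'for i in range(k)': consumes up to j steps, adding `one` and decrementing m;
-- .inl ans = the 'return answer' inside the for, .inr (m, ans) = the for finished.
def forA (one : Int) : Nat → Nat → Int → Int ⊕ (Nat × Int)
  | 0, m, ans => .inr (m, ans)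
  | _ + 1, 0, ans => .inl ans
  | j + 1, m + 1, ans => forA one j m (ans + one)

-- 'while True:' of A, with m already known nonnegative (m : Nat); the extra fuel
-- argument (always called with fuel > m, which suffices since m strictly decreases
-- each outer iteration) only makes the recursion structural — it changes no value.
def whileA (one two : Int) (kN : Nat) : Nat → Nat → Int → Int
  | 0, _, ans => ans  -- fuel exhausted: unreachable for fuel > m
  | fuel + 1, m, ans =>
    match forA one kN m ans with
    | .inl r => r
    | .inr (m', ans') =>
      if m' = 0 then ans' else whileA one two kN fuel (m' - 1) (ans' + two)

def solution (matrix : List Int) (m : Int) (k : Int) : Int :=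
  let s := PySem.List.sorted matrix (fun x => x) false
  match PySem.List.pyGet? s (-1), PySem.List.pyGet? s (-2) with
  | some one, some two =>
    if 0 ≤ m then whileA one two k.toNat (m.toNat + 1) m.toNat 0
    else 0  -- m < 0: the Python loop never terminates; excluded by Pre_solution
  | _, _ => 0  -- matrix[-1]/matrix[-2] raise IndexError; excluded by Pre_solution

-- ===== PORT B =====
def solution_alt (matrix : List Int) (m : Int) (k : Int) : Int :=
  let s := PySem.List.sorted matrix (fun x => x) false
  match PySem.List.pyGet? s (-1) with
  | none => 0  -- s[-1] raises IndexError; excluded by Pre_solution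
  | some one =>
    match PySem.List.pyGet? s (-2) with
    | none => 0  -- s[-2] raises IndexError; excluded by Pre_solution
    | some two =>
      if k + 1 = 0 then 0  -- divmod(m, 0) raises ZeroDivisionError; excluded by Pre_solution
      else PySem.Int.floordiv m (k + 1) * (k * one + two) + PySem.Int.mod m (k + 1) * one

-- ===== PRECONDITION & SPEC =====
-- Pre_ excludes matrices with fewer than 2 elements (A raises IndexError on matrix[-2]),
-- negative m (A's while loop never terminates there), and negative k (a repetition count,
-- outside the task's natural domain: there B's divmod raises at k = -1 and disagrees below).
def Pre_solution (matrix : List Int) (m : Int) (k : Int) : Prop :=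
  2 ≤ matrix.length ∧ 0 ≤ m ∧ 0 ≤ k
instance (matrix : List Int) (m : Int) (k : Int) : Decidable (Pre_solution matrix m k) := by
  unfold Pre_solution; infer_instance

def pvWitness_solution : List Int × Int × Int := ([2, 4, 5, 4, 6], 8, 3)

def Spec_solution (matrix : List Int) (m : Int) (k : Int) (out : Int) : Prop := out = solution_alt matrix m k
instance (matrix : List Int) (m : Int) (k : Int) (out : Int) : Decidable (Spec_solution matrix m k out) := by unfold Spec_solution; infer_instance

-- ===== CLAIM (what is proved, stated in full; the proofs are below) =====
def Claim_equal_solution : Prop := ∀ (matrix : List Int) (m : Int) (k : Int), Dom_solution matrix m k → Pre_solution matrix m k → Spec_solution matrix m k (solution matrix m k)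

-- ===== LEMMAS AND PROOFS =====

theorem forA_spec (one : Int) (j m : Nat) (ans : Int) :
    forA one j m ans =
      if m < j then .inl (ans + (m : Int) * one)
      else .inr (m - j, ans + (j : Int) * one) := by
  induction j generalizing m ans with
  | zero => simp [forA]
  | succ j ih =>
    cases m with
    | zero => simp [forA]
    | succ m =>
      rw [forA, ih]
      by_cases h : m < j
      · simp [h, Nat.succ_lt_succ h]; ring
      · have h' : ¬ m + 1 < j + 1 := by omega
        simp [h, h']
        ring

theorem whileA_closed (one two : Int) (kN : Nat) (fuel m : Nat) (hf : m < fuel) (ans : Int) :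
    whileA one two kN fuel m ans =
      ans + ((m / (kN + 1) : Nat) : Int) * ((kN : Int) * one + two)
          + ((m % (kN + 1) : Nat) : Int) * one := by
  induction fuel generalizing m ans with
  | zero => omega
  | succ fuel ih =>
    rw [whileA, forA_spec]
    by_cases h : m < kN
    · have h1 : m / (kN + 1) = 0 := Nat.div_eq_of_lt (by omega)
      have h2 : m % (kN + 1) = m := Nat.mod_eq_of_lt (by omega)
      simp only [h, if_true, h1, h2]
      push_cast; ring
    · simp only [h, if_false]
      by_cases h0 : m - kN = 0
      · have hm : m = kN := by omega
        simp only [h0, if_true]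
        subst hm
        have h1 : m / (m + 1) = 0 := Nat.div_eq_of_lt (by omega)
        have h2 : m % (m + 1) = m := Nat.mod_eq_of_lt (by omega)
        rw [h1, h2]; push_cast; ring
      · simp only [h0, if_false]
        rw [ih (m - kN - 1) (by omega)]
        have hle : kN + 1 ≤ m := by omega
        have hd : m / (kN + 1) = (m - (kN + 1)) / (kN + 1) + 1 :=
          Nat.div_eq_sub_div (by omega) hle
        have he : m - kN - 1 = m - (kN + 1) := by omega
        rw [he, hd, ← Nat.mod_eq_sub_mod hle]
        push_cast; ring

-- ===== VERDICT (by name: the statement is the Claim_ definition above) =====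
theorem solution_spec : Claim_equal_solution := by
  intro matrix m k _ hpre
  obtain ⟨hlen, hm, hk⟩ := hpre
  unfold Spec_solution solution solution_alt
  have hslen : 2 ≤ (PySem.List.sorted matrix (fun x => x) false).length := by
    rw [PySem.List.length_sorted]; exact hlen
  generalize hs : PySem.List.sorted matrix (fun x => x) false = s at *
  have h1 : PySem.List.pyGet? s (-1) = s[s.length - 1]? :=
    PySem.List.pyGet?_neg_ofNat s 1 (by omega) (by omega)
  have h2 : PySem.List.pyGet? s (-2) = s[s.length - 2]? :=
    PySem.List.pyGet?_neg_ofNat s 2 (by omega) (by omega)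
  have e1 : s.length - 1 < s.length := by omega
  have e2 : s.length - 2 < s.length := by omega
  simp only [h1, h2, List.getElem?_eq_getElem e1, List.getElem?_eq_getElem e2]
  rw [if_pos hm, if_neg (by omega)]
  have hkk : k = (k.toNat : Int) := (Int.toNat_of_nonneg hk).symm
  have hmN : m = (m.toNat : Int) := (Int.toNat_of_nonneg hm).symm
  rw [hkk, hmN]
  have hc1 : ((k.toNat : Int) + 1) = ((k.toNat + 1 : Nat) : Int) := by push_cast; ring
  rw [hc1, PySem.Int.floordiv_natCast, PySem.Int.mod_natCast]
  rw [whileA_closed _ _ _ _ _ (Nat.lt_succ_self _)]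
  simp only [Int.toNat_natCast]
  ring
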